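-- pv_equiv track=rewrite | github.com/rhallead/Scheduling-Simulator | schedSim.py | fifo_scheduler
-- ===== SOURCE A (Python) =====
-- def fifo_scheduler(jobs):
--     # call function to print out job info? maybe?
--     current_time = 0
--     results = []
--     # go through every job
--     for job in jobs:
--         run_time, arrival_time, pid = job
--         if arrival_time > current_time:
--             # update current time if necessary
--             current_time = arrival_time
--         # calculate turnaround time
--         turnaround_time = current_time + run_time - arrival_time
--         # calculate wait time
--         wait_time = current_time - arrival_time
--         results.append((turnaround_time, wait_time, pid))
--         # increase current time
--         current_time += run_time
--     return results
-- ===== SOURCE B (Python) =====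
-- def fifo_scheduler(jobs):
--     # Prefix-sum / running-max formulation (no clock simulation):
--     # start_i = P[i] + max(0, max_{k<=i}(arr_k - P[k])), where P[i] is the
--     # total run time of jobs before i.  Correct because unrolling the FIFO
--     # recurrence end = max(end, arr) + run gives
--     # end_i = max over k<=i of (arr_k + sum of runs k..i) floored at P[i+1].
--     n = len(jobs)
--     P = [0] * (n + 1)
--     for i, (run, _, _) in enumerate(jobs):
--         P[i + 1] = P[i] + run
--     M = [0] * n
--     best = 0
--     for i, (_, arr, _) in enumerate(jobs):
--         best = max(best, arr - P[i])
--         M[i] = best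
--     return [(P[i] + M[i] - arr + run, P[i] + M[i] - arr, pid)
--             for i, (run, arr, pid) in enumerate(jobs)]
-- ===== Notes on version B (the rewrite author's own statement) =====
-- stated objective: alternative
-- what changed: Replaced A's clock simulation (mutable current_time with start = max(clock, arrival)) by a closed-form reduction: prefix sums of run times plus a running maximum of slack arr_k - P_k, from which each start time is P[i] + M[i] directly.
import Mathlib
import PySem

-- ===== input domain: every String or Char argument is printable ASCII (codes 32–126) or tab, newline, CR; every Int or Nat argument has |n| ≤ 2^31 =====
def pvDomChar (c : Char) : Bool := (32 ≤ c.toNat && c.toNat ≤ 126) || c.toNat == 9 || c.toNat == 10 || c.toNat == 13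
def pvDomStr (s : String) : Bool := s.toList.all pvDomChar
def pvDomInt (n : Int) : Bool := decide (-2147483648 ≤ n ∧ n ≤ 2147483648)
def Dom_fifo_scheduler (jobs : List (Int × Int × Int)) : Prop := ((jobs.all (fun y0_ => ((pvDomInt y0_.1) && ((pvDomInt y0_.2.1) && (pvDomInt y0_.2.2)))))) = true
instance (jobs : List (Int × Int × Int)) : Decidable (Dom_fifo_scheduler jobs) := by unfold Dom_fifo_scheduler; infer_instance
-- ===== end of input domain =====

-- B replaces A's clock simulation by a prefix-sum + running-max-of-slack formulation (alternative algorithm, same cost).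


-- ===== PORT A =====
-- Literal port of A: one foldl over jobs with state (current_time, results).
def fifo_scheduler (jobs : List (Int × Int × Int)) : List (Int × Int × Int) :=
  (jobs.foldl (fun (st : Int × List (Int × Int × Int)) job =>
      let run_time := job.1
      let arrival_time := job.2.1
      let pid := job.2.2
      let current_time := if arrival_time > st.1 then arrival_time else st.1
      let turnaround_time := current_time + run_time - arrival_time
      let wait_time := current_time - arrival_time
      (current_time + run_time, st.2 ++ [(turnaround_time, wait_time, pid)]))
    (0, [])).2

-- ===== PORT B =====
-- Source B's first loop: prefix sums P[i] of run times (per-job prefix, threaded from p).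
def pvPrefixes (p : Int) (jobs : List (Int × Int × Int)) : List Int :=
  match jobs with
  | [] => []
  | (run, _, _) :: rest => p :: pvPrefixes (p + run) rest

-- Source B's second loop: running maximum M[i] of slack arr_k - P[k], threaded from best.
def pvRunMax (best : Int) (pairs : List ((Int × Int × Int) × Int)) : List Int :=
  match pairs with
  | [] => []
  | ((_, arr, _), pi) :: rest =>
      let b := max best (arr - pi)
      b :: pvRunMax b rest

-- Source B's final comprehension over (job, P[i], M[i]).
def fifo_scheduler_alt (jobs : List (Int × Int × Int)) : List (Int × Int × Int) :=
  let P := pvPrefixes 0 jobs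
  let M := pvRunMax 0 (jobs.zip P)
  ((jobs.zip P).zip M).map (fun x =>
    let run := x.1.1.1; let arr := x.1.1.2.1; let pid := x.1.1.2.2
    let p := x.1.2; let m := x.2
    (p + m - arr + run, p + m - arr, pid))

-- ===== PRECONDITION & SPEC =====
def Spec_fifo_scheduler (jobs : List (Int × Int × Int)) (out : List (Int × Int × Int)) : Prop := out = fifo_scheduler_alt jobs
instance (jobs : List (Int × Int × Int)) (out : List (Int × Int × Int)) : Decidable (Spec_fifo_scheduler jobs out) := by unfold Spec_fifo_scheduler; infer_instance

-- ===== CLAIM (what is proved, stated in full; the proofs are below) =====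
def Claim_equal_fifo_scheduler : Prop := ∀ (jobs : List (Int × Int × Int)), Dom_fifo_scheduler jobs → Spec_fifo_scheduler jobs (fifo_scheduler jobs)

-- ===== LEMMAS AND PROOFS =====
-- Invariant: A's clock t equals p + b (prefix sum plus current running max of slack).
theorem fifo_fold_eq (jobs : List (Int × Int × Int)) (p b : Int) (acc : List (Int × Int × Int)) :
    (jobs.foldl (fun (st : Int × List (Int × Int × Int)) job =>
      let run_time := job.1
      let arrival_time := job.2.1
      let pid := job.2.2
      let current_time := if arrival_time > st.1 then arrival_time else st.1
      let turnaround_time := current_time + run_time - arrival_time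
      let wait_time := current_time - arrival_time
      (current_time + run_time, st.2 ++ [(turnaround_time, wait_time, pid)]))
     (p + b, acc)).2
    = acc ++ ((jobs.zip (pvPrefixes p jobs)).zip (pvRunMax b (jobs.zip (pvPrefixes p jobs)))).map
        (fun x =>
          let run := x.1.1.1; let arr := x.1.1.2.1; let pid := x.1.1.2.2
          let p := x.1.2; let m := x.2
          (p + m - arr + run, p + m - arr, pid)) := by
  induction jobs generalizing p b acc with
  | nil => simp
  | cons j rest ih =>
      obtain ⟨run, arr, pid⟩ := j
      simp only [List.foldl_cons, pvPrefixes, pvRunMax, List.zip_cons_cons, List.map_cons]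
      have hstart : (if arr > p + b then arr else p + b) = p + max b (arr - p) := by
        simp only [max_def]; split_ifs <;> omega
      rw [hstart]
      have hnext : p + max b (arr - p) + run = (p + run) + max b (arr - p) := by ring
      rw [hnext, ih (p + run) (max b (arr - p))]
      simp
      ring_nf

-- ===== VERDICT (by name: the statement is the Claim_ definition above) =====
theorem fifo_scheduler_spec : Claim_equal_fifo_scheduler := by
  intro jobs _
  unfold Spec_fifo_scheduler fifo_scheduler fifo_scheduler_alt
  simpa using fifo_fold_eq jobs 0 0 []
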